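-- pv_equiv track=rewrite | github.com/ARQMath/ARQMathCode | Prepare_Dataset/LaTeXML/latex_validation.py | handle_percentage
-- ===== SOURCE A (Python) =====
-- def handle_percentage(latex_str):
--     # % sign is interpreted as ignore characters till \n is met
--     if '%' not in latex_str:
--         return latex_str
--     stack = []
--     result = ""
--
--     ignore = False
--     i = 0
--     while i < len(latex_str):
--         char = latex_str[i]
--         if not ignore and char != '%':
--             result += char
--         elif ignore and char == '\n':
--             ignore = False
--             stack.pop()
--         elif char == '%' and not ignore:
--             if i-1 < 0 or latex_str[i-1] != '\\':
--                 ignore = True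
--                 stack.append(char)
--             else:
--                 result += char
--         i += 1
--     return result
-- ===== SOURCE B (Python) =====
-- def handle_percentage(latex_str):
--     # Skip each comment in one jump with str.find instead of a char-by-char ignore-state machine.
--     out = []
--     prev = None
--     i = 0
--     n = len(latex_str)
--     while i < n:
--         c = latex_str[i]
--         if c == '%' and prev != '\\':
--             nl = latex_str.find('\n', i + 1)
--             if nl == -1:
--                 break
--             prev = '\n'
--             i = nl + 1
--         else:
--             out.append(c)
--             prev = c
--             i += 1
--     return ''.join(out)
-- ===== Notes on version B (the rewrite author's own statement) =====
-- stated objective: alternative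
-- what changed: Replaces the char-by-char ignore-flag state machine (with its comment stack) by a find-and-jump scan that, on an unescaped percent sign, locates the next newline in one search and resumes after it.
import Mathlib
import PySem

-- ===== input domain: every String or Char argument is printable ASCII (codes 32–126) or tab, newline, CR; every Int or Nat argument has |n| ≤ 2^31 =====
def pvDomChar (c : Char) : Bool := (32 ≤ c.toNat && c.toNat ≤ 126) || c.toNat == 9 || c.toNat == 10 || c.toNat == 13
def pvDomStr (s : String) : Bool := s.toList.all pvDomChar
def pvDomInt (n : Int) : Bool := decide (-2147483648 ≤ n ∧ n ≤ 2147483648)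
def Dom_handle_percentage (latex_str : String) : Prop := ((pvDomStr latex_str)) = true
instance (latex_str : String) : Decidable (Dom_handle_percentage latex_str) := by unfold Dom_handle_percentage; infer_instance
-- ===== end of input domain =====

-- B replaces A's char-by-char ignore-flag loop by a find-and-jump scan over the string;
-- same O(n) cost, genuinely different traversal (objective: alternative).

-- ===== PORT A =====
-- state = (stack, result, ignore); stack.pop() is ported as dropLast: Python's pop() only
-- runs while ignore holds, and then the stack is nonempty, so it never raises.
def pvStepA (cs : List Char) (st : List Char × List Char × Bool) (i : Int) : List Char × List Char × Bool :=
  let stack := st.1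
  let result := st.2.1
  let ignore := st.2.2
  let char := PySem.List.pyGetD cs i ' '   -- latex_str[i]; i ∈ [0, len) so never raises
  if ignore = false ∧ char ≠ '%' then (stack, result ++ [char], ignore)
  else if ignore = true ∧ char = '\n' then (stack.dropLast, result, false)
  else if char = '%' ∧ ignore = false then
    if i - 1 < 0 ∨ PySem.List.pyGetD cs (i - 1) ' ' ≠ '\\' then (stack ++ [char], result, true)
    else (stack, result ++ [char], ignore)
  else (stack, result, ignore)

def handle_percentage (latex_str : String) : String :=
  if PySem.Str.isIn "%" latex_str = false then latex_str
  else
    let cs := latex_str.toList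
    let fin := (PySem.List.pyRange 0 cs.length 1).foldl (pvStepA cs) ([], [], false)
    String.ofList fin.2.1

-- ===== PORT B =====
-- latex_str.find('\n', i+1) on the single char '\n' is ported as dropWhile on the suffix
-- after position i (exact: find returns the first '\n' at index > i or -1 = the [] case).
def pvGoB (prev : Option Char) (cs : List Char) : List Char :=
  match cs with
  | [] => []
  | c :: rest =>
    if c = '%' ∧ prev ≠ some '\\' then
      match h : rest.dropWhile (fun x => x != '\n') with
      | [] => []
      | _ :: after => pvGoB (some '\n') after
    else c :: pvGoB (some c) rest
termination_by cs.length
decreasing_by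
  · have h1 : (rest.dropWhile (fun x => x != '\n')).length ≤ rest.length :=
      rest.length_dropWhile_le _
    rw [h] at h1
    simp at h1 ⊢
    omega
  · simp

def handle_percentage_alt (latex_str : String) : String :=
  String.ofList (pvGoB none latex_str.toList)

-- ===== PRECONDITION & SPEC =====
def Spec_handle_percentage (latex_str : String) (out : String) : Prop := out = handle_percentage_alt latex_str
instance (latex_str : String) (out : String) : Decidable (Spec_handle_percentage latex_str out) := by unfold Spec_handle_percentage; infer_instance

-- ===== CLAIM (what is proved, stated in full; the proofs are below) =====
def Claim_equal_handle_percentage : Prop := ∀ (latex_str : String), Dom_handle_percentage latex_str → Spec_handle_percentage latex_str (handle_percentage latex_str)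

-- ===== LEMMAS AND PROOFS =====

-- index-free reformulation of A's loop body, carrying the previous character
def pvRecA (ignore : Bool) (prev : Option Char) (cs : List Char) : List Char :=
  match cs with
  | [] => []
  | c :: rest =>
    if ignore then
      if c = '\n' then pvRecA false (some '\n') rest
      else pvRecA true (some c) rest
    else if c ≠ '%' then c :: pvRecA false (some c) rest
    else if prev ≠ some '\\' then pvRecA true (some '%') rest
    else c :: pvRecA false (some '%') rest

def pvPrevAt (cs : List Char) (i : Nat) : Option Char :=
  if i = 0 then none else cs[i - 1]?

theorem pvGoB_no_percent (cs : List Char) (prev : Option Char) (h : '%' ∉ cs) :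
    pvGoB prev cs = cs := by
  induction cs generalizing prev with
  | nil => simp [pvGoB]
  | cons c rest ih =>
    have hc : c ≠ '%' := by intro he; exact h (he ▸ List.mem_cons_self)
    have hr : '%' ∉ rest := fun hm => h (List.mem_cons_of_mem _ hm)
    rw [pvGoB]
    simp [hc, ih _ hr]

theorem pvRecA_true (cs : List Char) (prev : Option Char) :
    pvRecA true prev cs =
      (match cs.dropWhile (fun x => x != '\n') with
       | [] => []
       | _ :: after => pvRecA false (some '\n') after) := by
  induction cs generalizing prev with
  | nil => simp [pvRecA]
  | cons c rest ih =>
    by_cases hc : c = '\n'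
    · subst hc; simp [pvRecA, List.dropWhile]
    · have hb : (c != '\n') = true := by simp [hc]
      rw [pvRecA]
      simp [hc, List.dropWhile, hb, ih]

theorem pvRecA_false_eq_goB : ∀ (n : Nat) (cs : List Char) (prev : Option Char),
    cs.length ≤ n → pvRecA false prev cs = pvGoB prev cs := by
  intro n
  induction n with
  | zero =>
    intro cs prev h
    have : cs = [] := List.length_eq_zero_iff.mp (Nat.le_zero.mp h)
    subst this; simp [pvRecA, pvGoB]
  | succ n ih =>
    intro cs prev h
    match cs with
    | [] => simp [pvRecA, pvGoB]
    | c :: rest =>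
      rw [pvRecA, pvGoB]
      by_cases hc : c = '%'
      · subst hc
        by_cases hp : prev = some '\\'
        · simp [hp]
          exact ih rest _ (by simpa using h)
        · simp [hp, pvRecA_true]
          have hd : (rest.dropWhile (fun x => x != '\n')).length ≤ rest.length :=
            rest.length_dropWhile_le _
          match hmm : rest.dropWhile (fun x => x != '\n') with
          | [] => rfl
          | _ :: after =>
            rw [hmm] at hd
            exact ih after _ (by simp at h hd ⊢; omega)
      · simp [hc]
        exact ih rest _ (by simpa using h)

theorem pvFoldl_bridge : ∀ (k i : Nat) (cs : List Char)
    (stack res : List Char) (ignore : Bool), cs.length = i + k →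
    ((PySem.List.pyRange i cs.length 1).foldl (pvStepA cs) (stack, res, ignore)).2.1
      = res ++ pvRecA ignore (pvPrevAt cs i) (cs.drop i) := by
  intro k
  induction k with
  | zero =>
    intro i cs stack res ignore hlen
    have h1 : PySem.List.pyRange i cs.length 1 = [] := by
      apply PySem.List.pyRange_one_eq_nil; omega
    have h2 : cs.drop i = [] := List.drop_eq_nil_of_le (by omega)
    simp [h1, h2, pvRecA]
  | succ k ih =>
    intro i cs stack res ignore hlen
    have hi : i < cs.length := by omega
    have h1 : PySem.List.pyRange i cs.length 1 = (i : Int) :: PySem.List.pyRange ((i : Int) + 1) cs.length 1 := by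
      apply PySem.List.pyRange_one_cons; exact_mod_cast hi
    have h1' : ((i : Int) + 1) = ((i + 1 : Nat) : Int) := by push_cast; ring
    have hdrop : cs.drop i = cs[i] :: cs.drop (i + 1) := (List.getElem_cons_drop hi).symm
    have hchar : PySem.List.pyGetD cs (i : Int) ' ' = cs[i] := by
      rw [PySem.List.pyGetD_natCast]; exact List.getD_eq_getElem cs ' ' hi
    have hprev1 : pvPrevAt cs (i + 1) = some cs[i] := by
      simp [pvPrevAt, List.getElem?_eq_getElem hi]
    -- the escape test of A, in simp-normal form, equals 'prev ≠ some '\'' on the carried char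
    have hescA : (¬ i = 0 → ¬ PySem.List.pyGetD cs ((i : Int) - 1) ' ' = '\\') ↔ pvPrevAt cs i ≠ some '\\' := by
      match i with
      | 0 => simp [pvPrevAt]
      | j + 1 =>
        have hj : j < cs.length := by omega
        have e1 : ((j + 1 : Nat) : Int) - 1 = (j : Int) := by push_cast; ring
        rw [e1, PySem.List.pyGetD_natCast, List.getD_eq_getElem cs ' ' hj]
        simp [pvPrevAt, List.getElem?_eq_getElem hj]
    have hescB : pvPrevAt cs i = some '\\' → (¬ i = 0 ∧ PySem.List.pyGetD cs ((i : Int) - 1) ' ' = '\\') := by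
      match i with
      | 0 => simp [pvPrevAt]
      | j + 1 =>
        have hj : j < cs.length := by omega
        have e1 : ((j + 1 : Nat) : Int) - 1 = (j : Int) := by push_cast; ring
        rw [e1, PySem.List.pyGetD_natCast, List.getD_eq_getElem cs ' ' hj]
        simp [pvPrevAt, List.getElem?_eq_getElem hj]
    rw [h1, List.foldl_cons, h1', hdrop]
    by_cases hig : ignore = true
    · subst hig
      by_cases hnl : cs[i] = '\n'
      · have hstep : pvStepA cs (stack, res, true) (i : Int) = (stack.dropLast, res, false) := by
          simp [pvStepA, hchar, hnl]
        rw [hnl] at hprev1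
        rw [hstep, ih (i + 1) cs stack.dropLast res false (by omega), hprev1]
        simp [pvRecA, hnl]
      · have hstep : pvStepA cs (stack, res, true) (i : Int) = (stack, res, true) := by
          by_cases hpc : cs[i] = '%' <;> simp [pvStepA, hchar, hnl, hpc]
        rw [hstep, ih (i + 1) cs stack res true (by omega), hprev1]
        simp [pvRecA, hnl]
    · have hig' : ignore = false := by simpa using hig
      subst hig'
      by_cases hpc : cs[i] = '%'
      · by_cases hpr : pvPrevAt cs i ≠ some '\\'
        · have hstep : pvStepA cs (stack, res, false) (i : Int) = (stack ++ [cs[i]], res, true) := by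
            simp [pvStepA, hchar, hpc]
            exact hescA.mpr hpr
          rw [hpc] at hprev1
          rw [hstep, ih (i + 1) cs (stack ++ [cs[i]]) res true (by omega), hprev1]
          simp [pvRecA, hpc, hpr]
        · have hpr' : pvPrevAt cs i = some '\\' := by simpa using hpr
          have hstep : pvStepA cs (stack, res, false) (i : Int) = (stack, res ++ [cs[i]], false) := by
            simp [pvStepA, hchar, hpc]
            exact hescB hpr'
          rw [hpc] at hprev1
          rw [hstep, ih (i + 1) cs stack (res ++ [cs[i]]) false (by omega), hprev1]
          simp [pvRecA, hpc, hpr']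
      · have hstep : pvStepA cs (stack, res, false) (i : Int) = (stack, res ++ [cs[i]], false) := by
          simp [pvStepA, hchar, hpc]
        rw [hstep, ih (i + 1) cs stack (res ++ [cs[i]]) false (by omega), hprev1]
        simp [pvRecA, hpc]

theorem pvIsIn_percent (s : String) :
    PySem.Str.isIn "%" s = false → '%' ∉ s.toList := by
  intro h hm
  have h2 : PySem.Str.isIn "%" s = true := by
    rw [PySem.Str.isIn_iff_infix]
    obtain ⟨l1, l2, hsplit⟩ := List.append_of_mem hm
    exact ⟨l1, l2, by simp [hsplit]⟩
  rw [h] at h2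
  cases h2

-- ===== VERDICT (by name: the statement is the Claim_ definition above) =====
theorem handle_percentage_spec : Claim_equal_handle_percentage := by
  intro s _
  unfold Spec_handle_percentage handle_percentage handle_percentage_alt
  by_cases h : PySem.Str.isIn "%" s = false
  · rw [if_pos h, pvGoB_no_percent _ _ (pvIsIn_percent s h)]
    exact String.ofList_toList.symm
  · rw [if_neg h]
    show String.ofList ((PySem.List.pyRange 0 (s.toList.length : Int) 1).foldl (pvStepA s.toList) ([], [], false)).2.1
        = String.ofList (pvGoB none s.toList)
    have hb := pvFoldl_bridge s.toList.length 0 s.toList [] [] false (by omega)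
    simp only [Nat.cast_zero, List.drop_zero, List.nil_append] at hb
    rw [hb]
    simp [pvPrevAt, pvRecA_false_eq_goB s.toList.length s.toList none le_rfl]
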